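-- pv_equiv track=rewrite | github.com/yang-guangliang/lian | src/lian/semantic/semantic_structs.py | count_cycles
-- ===== SOURCE A (Python) =====
-- def count_cycles(path):
--     n = len(path)
--     if n < 2:
--         return 0
--
--     last_element = path[-1]
--     cycle_count = 0
--
--     for i in range(n-2, -1, -1):
--         if path[i] == last_element:
--             cycle_length = n - i - 1
--             if path[i - cycle_length + 1 : i + 1] == path[i + 1 : i + 1 + cycle_length]:
--                 current_cycle = path[i - cycle_length + 1 : i + 1]
--                 cycle_count += 1
--                 for j in range(i - 2*cycle_length + 1, -1, -cycle_length):
--                     if path[j : j + cycle_length] == current_cycle: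
--                         cycle_count += 1
--
--                 break
--
--     return cycle_count
-- ===== SOURCE B (Python) =====
-- def count_cycles(path):
--     n = len(path)
--     if n < 2:
--         return 0
--     r = path[::-1]
--     # Z-array of the reversed path: z[m] = length of longest common prefix of r and r[m:]
--     z = [0] * n
--     z[0] = n
--     l = rr = 0
--     for m in range(1, n):
--         k = 0
--         if m < rr:
--             k = min(rr - m, z[m - l])
--         while m + k < n and r[k] == r[m + k]:
--             k += 1
--         z[m] = k
--         if m + k > rr:
--             l, rr = m, m + k
--     # smallest p such that the last two length-p blocks of path are equal
--     p = 0
--     for q in range(1, n // 2 + 1):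
--         if z[q] >= q:
--             p = q
--             break
--     if p == 0:
--         return 0
--     count = 1
--     for m in range(2 * p, n - p + 1, p):
--         if z[m] >= p:
--             count += 1
--     return count
-- ===== Notes on version B (the rewrite author's own statement) =====
-- stated objective: alternative
-- what changed: A scans backwards from the end comparing slices at each candidate position and re-slices in a nested loop; B reverses the path once, computes its Z-array (longest-common-prefix array) in linear time, and reads both the smallest repeated-block length and every block match directly off the array.
import Mathlib
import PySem

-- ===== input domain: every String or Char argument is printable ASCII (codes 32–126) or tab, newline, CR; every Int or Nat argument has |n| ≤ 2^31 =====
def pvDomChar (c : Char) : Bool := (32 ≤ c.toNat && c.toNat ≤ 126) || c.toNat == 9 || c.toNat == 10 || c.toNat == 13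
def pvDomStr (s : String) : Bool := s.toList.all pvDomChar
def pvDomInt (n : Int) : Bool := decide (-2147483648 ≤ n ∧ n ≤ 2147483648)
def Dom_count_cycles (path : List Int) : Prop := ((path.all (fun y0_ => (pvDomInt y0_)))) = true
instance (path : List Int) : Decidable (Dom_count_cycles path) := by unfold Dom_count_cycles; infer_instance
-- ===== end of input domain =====

-- B replaces A's backward scan with repeated slice comparisons by one Z-array (longest-common-prefix
-- array) of the reversed path, from which both the cycle length and every block match are read off.

-- ===== PORT A =====
-- inner loop: 'for j in range(i - 2*cl + 1, -1, -cl): if path[j:j+cl] == current: cycle_count += 1'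
-- ('0 < cl' in the guard only makes the descending recursion total; A reaches it only with cl ≥ 1)
def pvAInner (path current : List Int) (cl : Int) (j : Int) (acc : Int) : Int :=
  if h : 0 ≤ j ∧ 0 < cl then
    pvAInner path current cl (j - cl)
      (if PySem.List.slice path (some j) (some (j + cl)) == current then acc + 1 else acc)
  else acc
termination_by (j + 1).toNat
decreasing_by omega

-- outer loop: 'for i in range(n-2, -1, -1): …' with its break
def pvALoop (path : List Int) (n last_element : Int) (i : Int) : Int :=
  if h : 0 ≤ i then
    if PySem.List.pyGetD path i 0 == last_element then
      let cl := n - i - 1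
      if PySem.List.slice path (some (i - cl + 1)) (some (i + 1)) ==
         PySem.List.slice path (some (i + 1)) (some (i + 1 + cl)) then
        let current := PySem.List.slice path (some (i - cl + 1)) (some (i + 1))
        pvAInner path current cl (i - 2 * cl + 1) 1
      else pvALoop path n last_element (i - 1)
    else pvALoop path n last_element (i - 1)
  else 0
termination_by (i + 1).toNat
decreasing_by all_goals omega

def count_cycles (path : List Int) : Int :=
  let n : Int := path.length
  if n < 2 then 0
  else pvALoop path n (PySem.List.pyGetD path (-1) 0) (n - 2)

-- ===== PORT B =====
-- 'while m + k < n and r[k] == r[m + k]: k += 1'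
def pvZExtend (r : List Int) (m k : Nat) : Nat :=
  if h : m + k < r.length ∧ r.getD k 0 = r.getD (m + k) 0 then pvZExtend r m (k + 1) else k
termination_by r.length - (m + k)
decreasing_by omega

-- one iteration of 'for m in range(1, n)', state (z, l, rr); z grows by its m-th entry
def pvZStep (r : List Int) (s : List Nat × Nat × Nat) (m : Nat) : List Nat × Nat × Nat :=
  let k0 := if m < s.2.2 then min (s.2.2 - m) (s.1.getD (m - s.2.1) 0) else 0
  let k := pvZExtend r m k0
  if s.2.2 < m + k then (s.1 ++ [k], m, m + k) else (s.1 ++ [k], s.2.1, s.2.2)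

def pvZArr (r : List Int) : List Nat :=
  ((List.range' 1 (r.length - 1)).foldl (pvZStep r) ([r.length], 0, 0)).1

def count_cycles_alt (path : List Int) : Int :=
  let n := path.length
  if n < 2 then 0
  else
    let r := path.reverse
    let z := pvZArr r
    match (List.range' 1 (n / 2)).find? (fun q => decide (q ≤ z.getD q 0)) with
    | none => 0
    | some p =>
        (List.range' (2 * p) ((n - 2 * p) / p) p).foldl
          (fun c m => if p ≤ z.getD m 0 then c + 1 else c) 1

-- ===== PRECONDITION & SPEC =====
def Spec_count_cycles (path : List Int) (out : Int) : Prop := out = count_cycles_alt path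
instance (path : List Int) (out : Int) : Decidable (Spec_count_cycles path out) := by unfold Spec_count_cycles; infer_instance

-- ===== CLAIM (what is proved, stated in full; the proofs are below) =====
def Claim_equal_count_cycles : Prop := ∀ (path : List Int), Dom_count_cycles path → Spec_count_cycles path (count_cycles path)

-- ===== LEMMAS AND PROOFS =====


-- longest common prefix of two lists (the value the Z-array stores)
def pvLcp : List Int → List Int → Nat
  | a :: as, b :: bs => if a = b then pvLcp as bs + 1 else 0
  | _, _ => 0

def pvZs (r : List Int) (m : Nat) : Nat := pvLcp r (r.drop m)

theorem pvLcp_le_right (a b : List Int) : pvLcp a b ≤ b.length := by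
  induction a generalizing b with
  | nil => cases b <;> simp [pvLcp]
  | cons x as ih =>
    cases b with
    | nil => simp [pvLcp]
    | cons y bs =>
      simp only [pvLcp, List.length_cons]
      split
      · have := ih bs; omega
      · omega

theorem pvLcp_self (a : List Int) : pvLcp a a = a.length := by
  induction a with
  | nil => simp [pvLcp]
  | cons x as ih => simp [pvLcp, ih]

theorem pvLcp_take {a b : List Int} {k : Nat} (h : k ≤ pvLcp a b) : a.take k = b.take k := by
  induction k generalizing a b with
  | zero => simp
  | succ k ih =>
    cases a with
    | nil => cases b <;> simp_all [pvLcp]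
    | cons x as =>
      cases b with
      | nil => simp_all [pvLcp]
      | cons y bs =>
        simp only [pvLcp] at h
        split at h
        · rename_i hxy
          simp only [List.take_succ_cons]
          rw [hxy, ih (show k ≤ pvLcp as bs by omega)]
        · omega

theorem pvLcp_ge {a b : List Int} {k : Nat} (ha : k ≤ a.length) (hb : k ≤ b.length)
    (h : a.take k = b.take k) : k ≤ pvLcp a b := by
  induction k generalizing a b with
  | zero => omega
  | succ k ih =>
    cases a with
    | nil => simp at ha
    | cons x as =>
      cases b with
      | nil => simp at hb
      | cons y bs =>
        simp only [List.take_succ_cons, List.cons.injEq] at h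
        simp only [pvLcp]
        rw [if_pos h.1]
        have := ih (by simpa using ha) (by simpa using hb) h.2
        omega

theorem pvTake_succ_of {a b : List Int} {k : Nat} (hk : a.take k = b.take k)
    (ha : k < a.length) (hb : k < b.length) (he : a[k] = b[k]) :
    a.take (k + 1) = b.take (k + 1) := by
  rw [List.take_add_one, List.take_add_one, hk,
    List.getElem?_eq_getElem ha, List.getElem?_eq_getElem hb, he]

theorem pvElem_of_take_succ {a b : List Int} {k : Nat} (h : a.take (k + 1) = b.take (k + 1))
    (ha : k < a.length) (hb : k < b.length) : a[k] = b[k] := by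
  have h2 := congrArg (fun l => l[k]?) h
  simp only [List.getElem?_take_of_lt (Nat.lt_succ_self k)] at h2
  rwa [List.getElem?_eq_getElem ha, List.getElem?_eq_getElem hb, Option.some_inj] at h2

theorem pvZs_le_sub (r : List Int) (m : Nat) : pvZs r m ≤ r.length - m := by
  have := pvLcp_le_right r (r.drop m)
  simpa [pvZs] using this

theorem pvZExtend_eq (r : List Int) (m : Nat) (hm : 1 ≤ m) :
    ∀ (k : Nat), k ≤ pvZs r m → pvZExtend r m k = pvZs r m := by
  have main : ∀ (fuel k : Nat), r.length - (m + k) ≤ fuel → k ≤ pvZs r m →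
      pvZExtend r m k = pvZs r m := by
    intro fuel
    induction fuel with
    | zero =>
      intro k hfuel hk
      -- m + k ≥ r.length: the guard is false and k = pvZs r m
      rw [pvZExtend]
      rw [dif_neg (fun hc => absurd hc.1 (by omega))]
      have h1 := pvZs_le_sub r m
      omega
    | succ fuel ih =>
      intro k hfuel hk
      rw [pvZExtend]
      split
      · rename_i hg
        obtain ⟨hlt, heq⟩ := hg
        -- show k < pvZs r m, hence k+1 ≤ pvZs r m, and recurse
        have hklen : k < r.length := by omega
        have hkdrop : k < (r.drop m).length := by simp; omega
        have htk : r.take k = (r.drop m).take k := pvLcp_take hk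
        have hel : r[k] = (r.drop m)[k] := by
          rw [List.getElem_drop]
          have : r.getD k 0 = r.getD (m + k) 0 := heq
          rwa [List.getD_eq_getElem _ _ hklen, List.getD_eq_getElem _ _ (by omega)] at this
        have hsucc : k + 1 ≤ pvZs r m :=
          pvLcp_ge (by omega) (by simpa using hkdrop) (pvTake_succ_of htk hklen hkdrop hel)
        exact ih (k + 1) (by omega) hsucc
      · rename_i hg
        -- guard false: k = pvZs r m
        by_contra hne
        have hlt : k < pvZs r m := by omega
        have hs := pvZs_le_sub r m
        have hlen : k < r.length := by omega
        have hd : k < (r.drop m).length := by simp; omega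
        have htk : r.take (k + 1) = (r.drop m).take (k + 1) := pvLcp_take (show k + 1 ≤ pvLcp r (r.drop m) from hlt)
        have hel : r[k] = (r.drop m)[k] := pvElem_of_take_succ htk hlen hd
        rw [List.getElem_drop] at hel
        apply hg
        constructor
        · omega
        · rw [List.getD_eq_getElem _ _ hlen, List.getD_eq_getElem _ _ (by omega)]
          exact hel
  intro k hk
  exact main (r.length - (m + k)) k le_rfl hk


theorem pvShift {a b : List Int} {p q k : Nat} (h : a.take p = b.take p) (hqk : q + k ≤ p) :
    (a.drop q).take k = (b.drop q).take k := by
  have h1 := congrArg (List.drop q) h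
  rw [List.drop_take, List.drop_take] at h1
  have h2 := congrArg (List.take k) h1
  rwa [List.take_take, List.take_take, Nat.min_eq_left (by omega)] at h2

-- the loop invariant of B's Z-algorithm: after computing entries 0..m-1,
-- z holds the true prefix-match lengths and (l, rr) is a valid match window
def pvInv (r : List Int) (s : List Nat × Nat × Nat) (m : Nat) : Prop :=
  s.1.length = m ∧ (∀ j, j < m → s.1.getD j 0 = pvZs r j) ∧ s.2.1 < m ∧
  s.2.2 ≤ s.2.1 + pvZs r s.2.1 ∧ (s.2.1 = 0 → s.2.2 = 0)

theorem pvZStep_inv {r : List Int} {s : List Nat × Nat × Nat} {m : Nat}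
    (hm1 : 1 ≤ m) (hm2 : m < r.length) (hinv : pvInv r s m) :
    pvInv r (pvZStep r s m) (m + 1) ∧ (pvZStep r s m).1 = s.1 ++ [pvZs r m] := by
  obtain ⟨hlen, hz, hl, hrr, hl0⟩ := hinv
  set l := s.2.1 with hldef
  set rr := s.2.2 with hrdef
  have hzl := pvZs_le_sub r l
  have hrrlen : rr ≤ r.length := by omega
  have hk0 : (if m < rr then min (rr - m) (s.1.getD (m - l) 0) else 0) ≤ pvZs r m := by
    split
    · rename_i hmr
      have hl1 : 1 ≤ l := by
        by_contra hc
        have : l = 0 := by omega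
        have := hl0 this
        omega
      have hml : m - l < m := by omega
      have hzml : s.1.getD (m - l) 0 = pvZs r (m - l) := hz _ (by omega)
      rw [hzml]
      set k0 := min (rr - m) (pvZs r (m - l)) with hk0def
      have hk0a : k0 ≤ rr - m := Nat.min_le_left _ _
      have hk0b : k0 ≤ pvZs r (m - l) := Nat.min_le_right _ _
      -- window: take (rr - l) r = take (rr - l) (r.drop l)
      have hrr' : rr ≤ l + pvLcp r (r.drop l) := hrr
      have hwin : r.take (rr - l) = (r.drop l).take (rr - l) :=
        pvLcp_take (show rr - l ≤ pvLcp r (r.drop l) by omega)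
      -- shift by m - l
      have hsh : (r.drop (m - l)).take k0 = ((r.drop l).drop (m - l)).take k0 :=
        pvShift hwin (by omega)
      rw [List.drop_drop] at hsh
      have hml_add : l + (m - l) = m := by omega
      rw [hml_add] at hsh
      -- take k0 r = take k0 (r.drop (m - l))
      have h2 : r.take k0 = (r.drop (m - l)).take k0 := pvLcp_take hk0b
      have hfin : r.take k0 = (r.drop m).take k0 := by rw [h2, hsh]
      have hzsml := pvZs_le_sub r (m - l)
      exact pvLcp_ge (by omega) (by simp; omega) hfin
    · exact Nat.zero_le _
  have hkeq : pvZExtend r m (if m < rr then min (rr - m) (s.1.getD (m - l) 0) else 0) = pvZs r m :=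
    pvZExtend_eq r m hm1 _ hk0
  have hzm := pvZs_le_sub r m
  have hgetd : ∀ j, j < m + 1 → (s.1 ++ [pvZs r m]).getD j 0 = pvZs r j := by
    intro j hj
    rcases Nat.lt_or_ge j m with hjm | hjm
    · rw [List.getD_append _ _ _ _ (by omega), hz j hjm]
    · have hje : j = m := by omega
      subst hje
      rw [List.getD_eq_getElem?_getD, ← hlen, List.getElem?_append_right le_rfl]
      simp
  constructor
  · unfold pvZStep
    simp only [← hldef, ← hrdef, hkeq]
    split
    · rename_i hgt
      unfold pvInv
      dsimp only
      exact ⟨by simp [hlen], hgetd, by omega, le_refl _, by omega⟩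
    · rename_i hle
      unfold pvInv
      dsimp only
      exact ⟨by simp [hlen], hgetd, by omega, hrr, hl0⟩
  · unfold pvZStep
    simp only [← hldef, ← hrdef, hkeq]
    split <;> rfl

theorem pvZFold_inv (r : List Int) :
    ∀ t, t ≤ r.length - 1 →
      pvInv r ((List.range' 1 t).foldl (pvZStep r) ([r.length], 0, 0)) (1 + t) := by
  intro t
  induction t with
  | zero =>
    intro _
    refine ⟨rfl, ?_, Nat.zero_lt_one, ?_, fun _ => rfl⟩
    · intro j hj
      have : j = 0 := by omega
      subst this
      simp [pvZs, pvLcp_self]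
    · simp
  | succ t ih =>
    intro ht
    rw [List.range'_1_concat, List.foldl_append]
    simp only [List.foldl_cons, List.foldl_nil]
    have hinv := ih (by omega)
    have := pvZStep_inv (r := r) (m := 1 + t) (by omega) (by omega) hinv
    have h2 : 1 + t + 1 = 1 + (t + 1) := by omega
    rw [h2] at this
    exact this.1

theorem pvZArr_getD {r : List Int} {m : Nat} (hm : m < r.length) :
    (pvZArr r).getD m 0 = pvZs r m := by
  have := pvZFold_inv r (r.length - 1) le_rfl
  obtain ⟨hlen, hz, _⟩ := this
  exact hz m (by omega)


-- 'the last two length-p blocks of path are equal (and fit)': the condition A's scan looks for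
def pvQb (path : List Int) (p : Nat) : Bool :=
  decide (2 * p ≤ path.length) &&
    ((path.drop (path.length - 2 * p)).take p == path.drop (path.length - p))

theorem pvQb_iff {path : List Int} {p : Nat} :
    pvQb path p = true ↔
      2 * p ≤ path.length ∧
        (path.drop (path.length - 2 * p)).take p = path.drop (path.length - p) := by
  simp [pvQb]

theorem pvRevBlock {path : List Int} {m p : Nat} (h : m + p ≤ path.length) :
    (path.reverse.drop m).take p = ((path.drop (path.length - m - p)).take p).reverse := by
  rw [List.drop_reverse, List.take_reverse]
  congr 1
  have hlen : (path.take (path.length - m)).length = path.length - m := by simp only [List.length_take]; omega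
  rw [hlen, List.drop_take]
  congr 1
  omega

theorem pvTake_drop_self {path : List Int} {p : Nat} :
    (path.drop (path.length - p)).take p = path.drop (path.length - p) :=
  List.take_of_length_le (by simp; omega)

theorem pvZs_block_iff {path : List Int} {m p : Nat} (h : m + p ≤ path.length) :
    p ≤ pvZs path.reverse m ↔
      (path.drop (path.length - m - p)).take p = path.drop (path.length - p) := by
  have hr0 : path.reverse.take p = (path.drop (path.length - p)).reverse := by
    have h0 : (0 : Nat) + p ≤ path.length := by omega
    have := pvRevBlock (path := path) (m := 0) (p := p) h0
    rw [List.drop_zero] at this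
    rw [this]
    congr 1
    have : path.length - 0 - p = path.length - p := by omega
    rw [this, pvTake_drop_self]
  constructor
  · intro hz
    have ht : path.reverse.take p = (path.reverse.drop m).take p := pvLcp_take hz
    rw [hr0, pvRevBlock h] at ht
    exact (List.reverse_inj.mp ht).symm
  · intro hb
    apply pvLcp_ge (by simp; omega) (by simp; omega)
    rw [hr0, pvRevBlock h, hb]

theorem pvZs_Qb_iff {path : List Int} {p : Nat} :
    p ≤ pvZs path.reverse p ↔ pvQb path p = true := by
  constructor
  · intro hz
    have h2 : p ≤ path.length - p := by
      have := pvZs_le_sub path.reverse p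
      simp at this
      omega
    rcases Nat.eq_zero_or_pos p with hp0 | hp0
    · subst hp0; simp [pvQb]
    have h : p + p ≤ path.length := by omega
    rw [pvQb_iff]
    refine ⟨by omega, ?_⟩
    have := (pvZs_block_iff (path := path) (m := p) (p := p) h).mp hz
    have harith : path.length - p - p = path.length - 2 * p := by omega
    rwa [harith] at this
  · intro hq
    rw [pvQb_iff] at hq
    obtain ⟨h2, hb⟩ := hq
    have h : p + p ≤ path.length := by omega
    rw [pvZs_block_iff h]
    have harith : path.length - p - p = path.length - 2 * p := by omega
    rw [harith]
    exact hb

theorem pvSliceR {path : List Int} {i : Int} (h0 : 0 ≤ i) (h1 : i ≤ (path.length : Int) - 2) :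
    PySem.List.slice path (some (i + 1)) (some (i + 1 + ((path.length : Int) - i - 1))) =
      path.drop (path.length - (path.length - 1 - i.toNat)) := by
  rw [PySem.List.slice_toNat _ (by omega) (by omega)]
  have h2 : (i + 1 + ((path.length : Int) - i - 1)).toNat = path.length := by omega
  have h3 : (i + 1).toNat = path.length - (path.length - 1 - i.toNat) := by omega
  rw [h2, h3]
  apply List.take_of_length_le
  simp

theorem pvSliceL {path : List Int} {i : Int} (h0 : 0 ≤ i) (h1 : i ≤ (path.length : Int) - 2)
    (h2 : 2 * (path.length - 1 - i.toNat) ≤ path.length) :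
    PySem.List.slice path (some (i - ((path.length : Int) - i - 1) + 1)) (some (i + 1)) =
      (path.drop (path.length - 2 * (path.length - 1 - i.toNat))).take (path.length - 1 - i.toNat) := by
  rw [PySem.List.slice_toNat _ (by omega) (by omega)]
  have ha : (i - ((path.length : Int) - i - 1) + 1).toNat = path.length - 2 * (path.length - 1 - i.toNat) := by omega
  have hb : (i + 1).toNat - (i - ((path.length : Int) - i - 1) + 1).toNat = path.length - 1 - i.toNat := by omega
  rw [hb, ha]

theorem pvSliceTest {path : List Int} {i : Int} (h0 : 0 ≤ i) (h1 : i ≤ (path.length : Int) - 2) :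
    (PySem.List.slice path (some (i - ((path.length : Int) - i - 1) + 1)) (some (i + 1)) ==
      PySem.List.slice path (some (i + 1)) (some (i + 1 + ((path.length : Int) - i - 1)))) =
      pvQb path (path.length - 1 - i.toNat) := by
  set p := path.length - 1 - i.toNat with hp
  by_cases h2 : 2 * p ≤ path.length
  · rw [pvSliceL h0 h1 h2, pvSliceR h0 h1]
    unfold pvQb
    rw [decide_eq_true h2, Bool.true_and]
  · have hq : pvQb path p = false := by
      unfold pvQb
      rw [decide_eq_false h2, Bool.false_and]
    rw [hq]
    rw [beq_eq_false_iff_ne]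
    intro hc
    have hlc := congrArg List.length hc
    rw [PySem.List.length_slice, PySem.List.length_slice] at hlc
    simp only [PySem.List.clampIdx] at hlc
    split_ifs at hlc <;> omega

theorem pvLastElem {path : List Int} {i : Int} (h0 : 0 ≤ i) (h1 : i ≤ (path.length : Int) - 2)
    (hq : pvQb path (path.length - 1 - i.toNat) = true) :
    (PySem.List.pyGetD path i 0 == PySem.List.pyGetD path (-1) 0) = true := by
  set n := path.length with hn
  set p := n - 1 - i.toNat with hp
  rw [pvQb_iff] at hq
  obtain ⟨h2, hb⟩ := hq
  have hn2 : 2 ≤ n := by omega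
  have hp1 : 1 ≤ p := by omega
  have hblk := congrArg (fun l => l[p - 1]?) hb
  simp only at hblk
  rw [List.getElem?_take_of_lt (by omega), List.getElem?_drop, List.getElem?_drop] at hblk
  have hia : n - 2 * p + (p - 1) = i.toNat := by omega
  have hib : n - p + (p - 1) = n - 1 := by omega
  rw [hia, hib] at hblk
  rw [List.getElem?_eq_getElem (by omega), List.getElem?_eq_getElem (by omega)] at hblk
  have hel : path[i.toNat] = path[n - 1] := by
    have := Option.some_inj.mp hblk
    exact this
  rw [PySem.List.pyGetD_eq_getElem path 0 h0 (by omega)]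
  have hneg : PySem.List.pyGetD path (-(1 : Int)) 0 = path[n - 1] := by
    have := PySem.List.pyGetD_neg_natCast path 1 0 one_pos (by omega)
    simpa using this
  rw [hneg, hel]
  simp

theorem pvALoop_eq {path : List Int} (hn : 2 ≤ path.length) :
    ∀ (k : Nat) (i : Int), i.toNat = k → 0 ≤ i → i ≤ (path.length : Int) - 2 →
      pvALoop path (path.length : Int) (PySem.List.pyGetD path (-1) 0) i =
        match (List.range' (path.length - 1 - k) (k + 1)).find? (pvQb path) with
        | none => 0
        | some p =>
            pvAInner path ((path.drop (path.length - 2 * p)).take p) (p : Int)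
              ((path.length : Int) - 3 * p) 1 := by
  intro k
  induction k with
  | zero =>
    intro i hik h0 h1
    have hi0 : i = 0 := by omega
    subst hi0
    rw [pvALoop, dif_pos (le_refl (0 : Int))]
    rw [List.range'_succ]
    simp only [List.find?_cons]
    have hsl := pvSliceTest (path := path) (i := 0) le_rfl h1
    rw [hik] at hsl
    by_cases hq : pvQb path (path.length - 1 - 0) = true
    · rw [hq]
      rw [pvLastElem le_rfl h1 (by rw [hik]; exact hq), if_pos rfl]
      rw [hsl, hq, if_pos rfl]
      rw [pvSliceL le_rfl h1 (by rw [pvQb_iff] at hq; rw [hik]; exact hq.1)]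
      rw [hik]
      have e1 : (path.length : Int) - 0 - 1 = ((path.length - 1 - 0 : Nat) : Int) := by omega
      rw [e1]
      have e2 : (0 : Int) - 2 * ((path.length - 1 - 0 : Nat) : Int) + 1 =
          (path.length : Int) - 3 * ((path.length - 1 - 0 : Nat) : Int) := by omega
      rw [e2]
    · rw [Bool.not_eq_true] at hq
      rw [hq]
      simp only [List.range'_zero, List.find?_nil]
      have hrec : pvALoop path (path.length : Int) (PySem.List.pyGetD path (-1) 0) (0 - 1) = 0 := by
        rw [pvALoop, dif_neg (by omega)]
      by_cases hg : (PySem.List.pyGetD path (0 : Int) 0 == PySem.List.pyGetD path (-1) 0) = true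
      · rw [hg, if_pos rfl]
        rw [hsl, hq, if_neg (by simp)]
        exact hrec
      · rw [Bool.not_eq_true] at hg
        rw [hg, if_neg (by simp)]
        exact hrec
  | succ k ih =>
    intro i hik h0 h1
    have hi1 : 1 ≤ i := by omega
    rw [pvALoop, dif_pos h0]
    rw [List.range'_succ]
    simp only [List.find?_cons]
    have hsl := pvSliceTest (path := path) (i := i) h0 h1
    by_cases hq : pvQb path (path.length - 1 - (k + 1)) = true
    · rw [hik] at hsl
      rw [hq]
      rw [pvLastElem h0 h1 (by rw [hik]; exact hq), if_pos rfl]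
      rw [hsl, hq, if_pos rfl]
      rw [pvSliceL h0 h1 (by rw [pvQb_iff] at hq; rw [hik]; exact hq.1)]
      rw [hik]
      have e1 : (path.length : Int) - i - 1 = ((path.length - 1 - (k + 1) : Nat) : Int) := by omega
      rw [e1]
      have e2 : i - 2 * ((path.length - 1 - (k + 1) : Nat) : Int) + 1 =
          (path.length : Int) - 3 * ((path.length - 1 - (k + 1) : Nat) : Int) := by omega
      rw [e2]
    · rw [Bool.not_eq_true] at hq
      rw [hik] at hsl
      rw [hq]
      have hrec := ih (i - 1) (by omega) (by omega) (by omega)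
      have hstep : path.length - 1 - (k + 1) + 1 = path.length - 1 - k := by omega
      rw [hstep] at *
      by_cases hg : (PySem.List.pyGetD path i 0 == PySem.List.pyGetD path (-1) 0) = true
      · rw [hg, if_pos rfl]
        rw [hsl, hq, if_neg (by simp)]
        exact hrec
      · rw [Bool.not_eq_true] at hg
        rw [hg, if_neg (by simp)]
        exact hrec

theorem pvCountA_char {path : List Int} (hn : 2 ≤ path.length) :
    count_cycles path =
      match (List.range' 1 (path.length - 1)).find? (pvQb path) with
      | none => 0
      | some p =>
          pvAInner path ((path.drop (path.length - 2 * p)).take p) (p : Int)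
            ((path.length : Int) - 3 * p) 1 := by
  unfold count_cycles
  rw [if_neg (by omega)]
  have := pvALoop_eq hn (path.length - 2) ((path.length : Int) - 2) (by omega) (by omega) (by omega)
  rw [this]
  have e1 : path.length - 1 - (path.length - 2) = 1 := by omega
  have e2 : path.length - 2 + 1 = path.length - 1 := by omega
  rw [e1, e2]

-- the descending index list A's inner loop walks through
def pvJList (p : Nat) (j : Int) : List Int :=
  if _h : 0 ≤ j ∧ 0 < p then j :: pvJList p (j - p) else []
termination_by (j + 1).toNat
decreasing_by omega

theorem pvAInner_count (path cur : List Int) (p : Nat) :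
    ∀ (j : Int) (acc : Int),
      pvAInner path cur (p : Int) j acc =
        acc + ((pvJList p j).countP
          (fun j' => PySem.List.slice path (some j') (some (j' + (p : Int))) == cur) : Int) := by
  have main : ∀ (fuel : Nat) (j : Int) (acc : Int), (j + 1).toNat ≤ fuel →
      pvAInner path cur (p : Int) j acc =
        acc + ((pvJList p j).countP
          (fun j' => PySem.List.slice path (some j') (some (j' + (p : Int))) == cur) : Int) := by
    intro fuel
    induction fuel with
    | zero =>
      intro j acc hf
      rw [pvAInner, dif_neg (fun hc => absurd hc.1 (by omega))]
      rw [pvJList, dif_neg (fun hc => absurd hc.1 (by omega))]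
      simp
    | succ fuel ih =>
      intro j acc hf
      by_cases hg : 0 ≤ j ∧ 0 < p
      · have hgi : 0 ≤ j ∧ 0 < (p : Int) := ⟨hg.1, by exact_mod_cast Int.natCast_pos.mpr hg.2⟩
        by_cases hs : (PySem.List.slice path (some j) (some (j + (p : Int))) == cur) = true
        · rw [pvAInner, dif_pos hgi, if_pos hs, pvJList, dif_pos hg, List.countP_cons,
            ih (j - p) _ (by omega)]
          simp only [hs, if_true]
          push_cast
          omega
        · rw [Bool.not_eq_true] at hs
          rw [pvAInner, dif_pos hgi, if_neg (by simp [hs]), pvJList, dif_pos hg,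
            List.countP_cons, ih (j - p) _ (by omega)]
          simp only [hs]
          push_cast
          omega
      · rw [pvAInner, dif_neg (fun hc => hg ⟨hc.1, by exact_mod_cast hc.2⟩)]
        rw [pvJList, dif_neg hg]
        simp
  intro j acc
  exact main (j + 1).toNat j acc le_rfl

theorem pvJList_eq_map (n : Int) (p : Nat) (hp : 1 ≤ p) :
    ∀ (T s : Nat), (n - p - s < T * p) →
      (T ≠ 0 → ((T : Int) - 1) * p ≤ n - p - s) →
      pvJList p (n - p - s) = (List.range' s T p).map (fun (m : Nat) => n - p - (m : Int)) := by
  intro T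
  induction T with
  | zero =>
    intro s h1 h2
    rw [pvJList, dif_neg (fun hc => by simp at h1; omega)]
    simp
  | succ T ih =>
    intro s h1 h2
    have hT : ((T : Int)) * p ≤ n - p - s := by
      have := h2 (Nat.succ_ne_zero T)
      push_cast at this
      linarith
    have hTp : (0 : Int) ≤ (T : Int) * p := by positivity
    rw [pvJList, dif_pos ⟨by linarith, hp⟩]
    rw [List.range'_succ, List.map_cons]
    congr 1
    have e : n - p - s - p = n - p - ((s + p : Nat) : Int) := by push_cast; ring
    rw [e]
    apply ih (s + p)
    · have h1' : n - p - s < ((T : Int) + 1) * p := by push_cast at h1; linarith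
      have : ((T : Int) + 1) * p = (T : Int) * p + p := by ring
      push_cast
      linarith [h1']
    · intro hT0
      have : ((T : Int) - 1) * p = (T : Int) * p - p := by ring
      push_cast
      linarith

theorem pvFind?_congr {l : List Nat} {p q : Nat → Bool} (h : ∀ x ∈ l, p x = q x) :
    l.find? p = l.find? q := by
  induction l with
  | nil => rfl
  | cons a t ih =>
    simp only [List.find?_cons, h a (List.mem_cons_self)]
    cases hq : q a with
    | false => exact ih (fun x hx => h x (List.mem_cons_of_mem a hx))
    | true => rfl

theorem pvCountB_char {path : List Int} (hn : 2 ≤ path.length) :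
    count_cycles_alt path =
      match (List.range' 1 (path.length / 2)).find?
          (fun q => decide (q ≤ (pvZArr path.reverse).getD q 0)) with
      | none => 0
      | some p =>
          (List.range' (2 * p) ((path.length - 2 * p) / p) p).foldl
            (fun c m => if p ≤ (pvZArr path.reverse).getD m 0 then c + 1 else c) 1 := by
  unfold count_cycles_alt
  dsimp only
  rw [if_neg (by omega)]

theorem pvFindB_eq {path : List Int} (hn : 2 ≤ path.length) :
    (List.range' 1 (path.length / 2)).find?
        (fun q => decide (q ≤ (pvZArr path.reverse).getD q 0)) =
      (List.range' 1 (path.length - 1)).find? (pvQb path) := by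
  have hcongr : (List.range' 1 (path.length / 2)).find?
      (fun q => decide (q ≤ (pvZArr path.reverse).getD q 0)) =
      (List.range' 1 (path.length / 2)).find? (pvQb path) := by
    have : ∀ q ∈ List.range' 1 (path.length / 2),
        (decide (q ≤ (pvZArr path.reverse).getD q 0)) = pvQb path q := by
      intro q hq
      rw [List.mem_range'] at hq
      obtain ⟨t, ht, hqe⟩ := hq
      have hq1 : 1 ≤ q := by omega
      have hqn : q < path.length := by omega
      have hz : (pvZArr path.reverse).getD q 0 = pvZs path.reverse q :=
        pvZArr_getD (by simp; omega)
      rw [hz]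
      cases hb : pvQb path q with
      | true => exact decide_eq_true (pvZs_Qb_iff.mpr hb)
      | false =>
        apply decide_eq_false
        intro hc
        have h3 := pvZs_Qb_iff.mp hc
        rw [hb] at h3
        simp at h3
    exact pvFind?_congr this
  rw [hcongr]
  have hsplit : List.range' 1 (path.length - 1) =
      List.range' 1 (path.length / 2) ++
        List.range' (1 + path.length / 2) (path.length - 1 - path.length / 2) := by
    have := @List.range'_append 1 (path.length / 2) (path.length - 1 - path.length / 2) 1
    simp only [Nat.one_mul] at this
    rw [this]
    congr 1
    omega
  rw [hsplit, List.find?_append]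
  have htail : (List.range' (1 + path.length / 2) (path.length - 1 - path.length / 2)).find?
      (pvQb path) = none := by
    rw [List.find?_eq_none]
    intro q hq
    rw [List.mem_range'] at hq
    obtain ⟨t, ht, hqe⟩ := hq
    intro hc
    rw [pvQb_iff] at hc
    omega
  rw [htail]
  cases (List.range' 1 (path.length / 2)).find? (pvQb path) <;> rfl

theorem pvCount_eq {path : List Int} (hn : 2 ≤ path.length) {p : Nat}
    (hp : 1 ≤ p) (hq : pvQb path p = true) :
    pvAInner path ((path.drop (path.length - 2 * p)).take p) (p : Int)
        ((path.length : Int) - 3 * p) 1 =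
      (List.range' (2 * p) ((path.length - 2 * p) / p) p).foldl
        (fun c m => if p ≤ (pvZArr path.reverse).getD m 0 then c + 1 else c) 1 := by
  rw [pvQb_iff] at hq
  obtain ⟨h2p, hblk⟩ := hq
  -- A side: unfold the inner loop into a count over the index list
  rw [pvAInner_count]
  have e0 : (path.length : Int) - 3 * p = (path.length : Int) - p - ((2 * p : Nat) : Int) := by
    push_cast; ring
  rw [e0]
  have hndiv1 : path.length - 2 * p < ((path.length - 2 * p) / p + 1) * p := by
    rcases Nat.lt_or_ge (path.length - 2 * p) (((path.length - 2 * p) / p + 1) * p) with h | h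
    · exact h
    · exfalso
      have := (Nat.le_div_iff_mul_le (by omega)).mpr h
      omega
  have hndiv2 : ((path.length - 2 * p) / p) * p ≤ path.length - 2 * p := Nat.div_mul_le_self _ _
  have hA : ((path.length - 2 * p : Nat) : Int) = (path.length : Int) - 2 * p := by omega
  have hB1 : ((path.length - 2 * p : Nat) : Int) <
      ((((path.length - 2 * p) / p) * p : Nat) : Int) + p := by
    have h' := hndiv1
    rw [Nat.add_mul, Nat.one_mul] at h'
    exact_mod_cast h'
  have hB2 : ((((path.length - 2 * p) / p) * p : Nat) : Int) ≤ (path.length : Int) - 2 * p := by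
    rw [← hA]; exact_mod_cast hndiv2
  rw [pvJList_eq_map (path.length : Int) p hp ((path.length - 2 * p) / p) (2 * p)
      (by push_cast at hB1 ⊢; linarith) (by intro _; push_cast at hB2 ⊢; linarith)]
  rw [List.countP_map]
  -- B side: unfold the fold into a count
  rw [PySem.List.foldl_ite_add_one (fun m => p ≤ (pvZArr path.reverse).getD m 0)]
  congr 1
  congr 1
  apply List.countP_congr
  intro m hm
  rw [List.mem_range'] at hm
  obtain ⟨t, ht, hme⟩ := hm
  have hmp : m + p ≤ path.length := by
    have h1 : (t + 1) * p ≤ ((path.length - 2 * p) / p) * p :=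
      Nat.mul_le_mul_right p (by omega)
    have h2 : m + p = 2 * p + (t + 1) * p := by subst hme; ring
    omega
  have hzm : (pvZArr path.reverse).getD m 0 = pvZs path.reverse m :=
    pvZArr_getD (by simp; omega)
  simp only [Function.comp]
  have hsl : PySem.List.slice path (some ((path.length : Int) - p - m))
      (some ((path.length : Int) - p - m + p)) = (path.drop (path.length - m - p)).take p := by
    rw [PySem.List.slice_toNat _ (by omega) (by omega)]
    have ha : ((path.length : Int) - p - m).toNat = path.length - m - p := by omega
    have hb : ((path.length : Int) - p - m + p).toNat - ((path.length : Int) - p - m).toNat = p := by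
      omega
    rw [hb, ha]
  rw [hsl, hzm, hblk]
  cases hb : decide ((path.drop (path.length - m - p)).take p = path.drop (path.length - p)) with
  | true =>
    have hbe := of_decide_eq_true hb
    rw [decide_eq_true ((pvZs_block_iff (by omega)).mpr hbe)]
    simp [hbe]
  | false =>
    have hbe := of_decide_eq_false hb
    rw [decide_eq_false (fun hc => hbe ((pvZs_block_iff (by omega)).mp hc))]
    constructor
    · intro hc
      exact absurd (by simpa using hc) hbe
    · intro hc
      cases hc

-- ===== VERDICT (by name: the statement is the Claim_ definition above) =====
theorem count_cycles_spec : Claim_equal_count_cycles := by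
  unfold Claim_equal_count_cycles Spec_count_cycles
  intro path _
  by_cases hn : path.length < 2
  · unfold count_cycles count_cycles_alt
    dsimp only
    rw [if_pos (by exact_mod_cast hn), if_pos hn]
  · have hn' : 2 ≤ path.length := by omega
    rw [pvCountA_char hn', pvCountB_char hn', pvFindB_eq hn']
    cases hF : (List.range' 1 (path.length - 1)).find? (pvQb path) with
    | none => rfl
    | some p =>
      have hq := List.find?_some hF
      have hmem := List.mem_of_find?_eq_some hF
      rw [List.mem_range'] at hmem
      obtain ⟨t, ht, hpe⟩ := hmem
      exact pvCount_eq hn' (by omega) hq
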